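-- pv_equiv track=rewrite | github.com/yhyycj/bullet_split | cc_split.py | find_numeric_seq
-- ===== SOURCE A (Python) =====
-- from collections import OrderedDict
--
-- MAX_BULLET = 15    # reasonable largest length of a bullet list
--
-- def find_numeric_seq(inStr, idx2dig):
--     '''
--     Find the longest continuous numeric sequence (ie. 1, 2, 3, ...)
--
--     Args:
--         - inStr (string): raw sentence
--         - idx2dig: return value of function find_numeric_bullets {<index>: <digits found>}
--
--     Returns:
--         - An ordered dictionary containing continuous numeric sequence {<digit>: <list of indices>}
--     '''
--
--     num_indice = OrderedDict()
--
--     for i in range(1, MAX_BULLET):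
--         i_indice = [int(idx) for idx, num in idx2dig.items() if int(num) == i]
--         if len(i_indice) == 0:
--             break
--         num_indice[str(i)] = i_indice
--     return num_indice
-- ===== SOURCE B (Python) =====
-- from collections import OrderedDict
--
-- MAX_BULLET = 15
--
--
-- def find_numeric_seq(inStr, idx2dig):
--     # One grouping pass: int(num) -> list of index strings (iteration order kept);
--     # then assemble the consecutive run 1, 2, ... (< MAX_BULLET), converting the
--     # indices of each emitted group only.
--     groups = {}
--     for idx, num in idx2dig.items():
--         groups.setdefault(int(num), []).append(idx)
--     num_indice = OrderedDict()
--     i = 1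
--     while i < MAX_BULLET and i in groups:
--         num_indice[str(i)] = [int(idx) for idx in groups[i]]
--         i += 1
--     return num_indice
-- ===== Notes on version B (the rewrite author's own statement) =====
-- stated objective: alternative
-- what changed: Replaces the per-digit rescans of idx2dig (one full scan for each i in 1..14) by a single grouping pass building int(num) -> [indices], followed by a consecutive-from-1 assembly walk over the groups.
import Mathlib
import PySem

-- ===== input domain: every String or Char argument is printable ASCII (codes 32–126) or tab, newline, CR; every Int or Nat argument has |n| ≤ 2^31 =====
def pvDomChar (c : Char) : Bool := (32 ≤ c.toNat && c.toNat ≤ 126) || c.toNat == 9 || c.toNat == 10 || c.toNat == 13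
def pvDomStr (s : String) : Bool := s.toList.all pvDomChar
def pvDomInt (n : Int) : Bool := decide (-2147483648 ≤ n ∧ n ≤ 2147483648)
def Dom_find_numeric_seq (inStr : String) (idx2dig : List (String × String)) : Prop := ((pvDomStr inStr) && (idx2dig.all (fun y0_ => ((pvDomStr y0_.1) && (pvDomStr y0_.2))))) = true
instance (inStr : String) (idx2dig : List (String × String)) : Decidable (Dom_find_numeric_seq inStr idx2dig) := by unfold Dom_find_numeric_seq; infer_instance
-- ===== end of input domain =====

-- B replaces A's per-digit rescans of idx2dig by one grouping pass plus a consecutive-from-1 walk.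

-- ===== PORT A =====
-- the list comprehension [int(idx) for idx, num in idx2dig.items() if int(num) == i]
-- (int(·) of an unparseable string raises in Python; Pre_ excludes exactly those inputs, the port uses .getD 0 there)
def pvIndiceA (items : List (String × String)) (i : Int) : List Int :=
  (items.filter (fun p => (PySem.Int.ofStr? p.2).getD 0 == i)).map (fun p => (PySem.Int.ofStr? p.1).getD 0)

-- the 'for i in range(1, MAX_BULLET)' loop with its break; num_indice is an OrderedDict whose
-- keys str(i) are pairwise distinct, so each insertion appends a fresh key (exact)
def pvLoopA (items : List (String × String)) : List Int → List (String × List Int) → List (String × List Int)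
  | [], acc => acc
  | i :: rest, acc =>
      let i_indice := pvIndiceA items i
      if i_indice.length = 0 then acc
      else pvLoopA items rest (acc ++ [(PySem.Int.toStr i, i_indice)])

def find_numeric_seq (inStr : String) (idx2dig : List (String × String)) : List (String × List Int) :=
  pvLoopA (PySem.Dict.ofList idx2dig).items (PySem.List.pyRange 1 15 1) []

-- ===== PORT B =====
-- groups.setdefault(int(num), []).append(idx)
def pvGroupB (items : List (String × String)) : PySem.Dict Int (List String) :=
  items.foldl
    (fun d p => d.modify ((PySem.Int.ofStr? p.2).getD 0) [] (fun l => l ++ [p.1]))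
    PySem.Dict.empty

-- the 'while i < MAX_BULLET and i in groups' loop; fuel 14 bounds the at most 14 iterations
def pvAssembleB (g : PySem.Dict Int (List String)) : Nat → Int → List (String × List Int) → List (String × List Int)
  | 0, _, acc => acc
  | n + 1, i, acc =>
      if i < 15 ∧ g.contains i then
        pvAssembleB g n (i + 1)
          (acc ++ [(PySem.Int.toStr i, (g.getD i []).map (fun s => (PySem.Int.ofStr? s).getD 0))])
      else acc

def find_numeric_seq_alt (inStr : String) (idx2dig : List (String × String)) : List (String × List Int) :=
  pvAssembleB (pvGroupB (PySem.Dict.ofList idx2dig).items) 14 1 []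

-- ===== PRECONDITION & SPEC =====
-- Pre_ excludes exactly the inputs where Python raises ValueError: some value string of the dict does
-- not parse as an int, or some key string of a digit group that the consecutive-from-1 walk reaches
-- does not parse as an int.  (Both A and B raise on exactly these inputs.)
def Pre_find_numeric_seq (inStr : String) (idx2dig : List (String × String)) : Prop :=
  (∀ p ∈ (PySem.Dict.ofList idx2dig).items, (PySem.Int.ofStr? p.2).isSome) ∧
  (∀ i ∈ PySem.List.pyRange 1 15 1,
    (∀ j ∈ PySem.List.pyRange 1 i 1, ∃ q ∈ (PySem.Dict.ofList idx2dig).items, PySem.Int.ofStr? q.2 = some j) →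
    ∀ p ∈ (PySem.Dict.ofList idx2dig).items, PySem.Int.ofStr? p.2 = some i → (PySem.Int.ofStr? p.1).isSome)
instance (inStr : String) (idx2dig : List (String × String)) : Decidable (Pre_find_numeric_seq inStr idx2dig) := by
  unfold Pre_find_numeric_seq; infer_instance

def pvWitness_find_numeric_seq : String × (List (String × String)) := ("1. a 2. b", [("3", "1"), ("8", "2")])

def Spec_find_numeric_seq (inStr : String) (idx2dig : List (String × String)) (out : List (String × List Int)) : Prop := out = find_numeric_seq_alt inStr idx2dig
instance (inStr : String) (idx2dig : List (String × String)) (out : List (String × List Int)) : Decidable (Spec_find_numeric_seq inStr idx2dig out) := by unfold Spec_find_numeric_seq; infer_instance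

-- ===== CLAIM (what is proved, stated in full; the proofs are below) =====
def Claim_equal_find_numeric_seq : Prop := ∀ (inStr : String) (idx2dig : List (String × String)), Dom_find_numeric_seq inStr idx2dig → Pre_find_numeric_seq inStr idx2dig → Spec_find_numeric_seq inStr idx2dig (find_numeric_seq inStr idx2dig)

-- ===== LEMMAS AND PROOFS =====

theorem groupB_getD (items : List (String × String)) (d : PySem.Dict Int (List String)) (i : Int) :
    (items.foldl
      (fun d p => d.modify ((PySem.Int.ofStr? p.2).getD 0) [] (fun l => l ++ [p.1])) d).getD i []
    = d.getD i [] ++ ((items.filter (fun p => (PySem.Int.ofStr? p.2).getD 0 == i)).map (·.1)) := by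
  induction items generalizing d with
  | nil => simp
  | cons p rest ih =>
    simp only [List.foldl_cons, List.filter_cons]
    by_cases h : ((PySem.Int.ofStr? p.2).getD 0 : Int) = i
    · simp [h, ih, PySem.Dict.getD_modify_self]
    · have hb : (((PySem.Int.ofStr? p.2).getD 0 : Int) == i) = false := by simp [h]
      simp [hb, ih, PySem.Dict.getD_modify_of_ne _ _ _ (fun he => h he.symm)]

theorem groupB_contains (items : List (String × String)) (d : PySem.Dict Int (List String)) (i : Int) :
    (items.foldl
      (fun d p => d.modify ((PySem.Int.ofStr? p.2).getD 0) [] (fun l => l ++ [p.1])) d).contains i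
    = (d.contains i || items.any (fun p => (PySem.Int.ofStr? p.2).getD 0 == i)) := by
  induction items generalizing d with
  | nil => simp
  | cons p rest ih =>
    simp only [List.foldl_cons, List.any_cons, ih,
      PySem.Dict.contains_eq_decide_mem_keys, PySem.Dict.keys_modify, PySem.Dict.mem_keys_insert]
    by_cases h : ((PySem.Int.ofStr? p.2).getD 0 : Int) = i
    · simp [h]
    · have hb : (((PySem.Int.ofStr? p.2).getD 0 : Int) == i) = false := by simp [h]
      have hb' : (i = (PySem.Int.ofStr? p.2).getD 0) = False := by
        simp [eq_comm]; exact fun he => h he.symm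
      simp [hb, hb']

theorem loopA_eq_assembleB (items : List (String × String)) :
    ∀ (n : Nat) (i : Int) (acc : List (String × List Int)), i = 15 - n → n ≤ 14 →
      pvLoopA items (PySem.List.pyRange i 15 1) acc = pvAssembleB (pvGroupB items) n i acc := by
  intro n
  induction n with
  | zero =>
    intro i acc hi _
    subst hi
    rw [PySem.List.pyRange_one_eq_nil (by norm_num)]
    rfl
  | succ n ih =>
    intro i acc hi hn
    have hlt : i < 15 := by omega
    rw [PySem.List.pyRange_one_cons hlt]
    show (if (pvIndiceA items i).length = 0 then acc
          else pvLoopA items (PySem.List.pyRange (i+1) 15 1)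
                 (acc ++ [(PySem.Int.toStr i, pvIndiceA items i)])) = _
    have hfilter : pvIndiceA items i
        = ((items.filter (fun p => (PySem.Int.ofStr? p.2).getD 0 == i)).map (·.1)).map
            (fun s => (PySem.Int.ofStr? s).getD 0) := by
      simp [pvIndiceA, List.map_map]
    have hgetD := groupB_getD items PySem.Dict.empty i
    have hcont := groupB_contains items PySem.Dict.empty i
    by_cases hz : (items.filter (fun p => (PySem.Int.ofStr? p.2).getD 0 == i)) = []
    · -- group i empty: A breaks, B's while-condition is false
      have hA : (pvIndiceA items i).length = 0 := by simp [hfilter, hz]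
      have hanyf : items.any (fun p => (PySem.Int.ofStr? p.2).getD 0 == i) = false := by
        rw [List.any_eq_false]
        intro x hx
        simpa using List.filter_eq_nil_iff.mp hz x hx
      have hB : (pvGroupB items).contains i = false := by
        simp [pvGroupB, hcont, hanyf, PySem.Dict.contains_empty]
      simp only [hA]
      show _ = pvAssembleB (pvGroupB items) (n+1) i acc
      simp [pvAssembleB, hB]
    · have hA : ¬ (pvIndiceA items i).length = 0 := by simp [hfilter, hz]
      have hanyt : items.any (fun p => (PySem.Int.ofStr? p.2).getD 0 == i) = true := by
        obtain ⟨x, hx⟩ := List.exists_mem_of_ne_nil _ hz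
        obtain ⟨hxm, hxp⟩ := List.mem_filter.mp hx
        exact List.any_eq_true.mpr ⟨x, hxm, hxp⟩
      have hB : (pvGroupB items).contains i = true := by
        simp [pvGroupB, hcont, hanyt]
      have hval : (pvGroupB items).getD i [] = (items.filter (fun p => (PySem.Int.ofStr? p.2).getD 0 == i)).map (·.1) := by
        simp [pvGroupB, hgetD, PySem.Dict.getD_empty]
      rw [if_neg hA]
      show _ = pvAssembleB (pvGroupB items) (n+1) i acc
      rw [pvAssembleB, if_pos ⟨hlt, hB⟩, hval, ← hfilter]
      exact ih (i+1) _ (by omega) (by omega)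

-- ===== VERDICT (by name: the statement is the Claim_ definition above) =====
theorem find_numeric_seq_spec : Claim_equal_find_numeric_seq := by
  intro inStr idx2dig _ _
  show find_numeric_seq inStr idx2dig = find_numeric_seq_alt inStr idx2dig
  unfold find_numeric_seq find_numeric_seq_alt
  exact loopA_eq_assembleB _ 14 1 [] (by norm_num) (by norm_num)
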